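-- pv_equiv track=rewrite | github.com/SamuraiJenkinz/onsitereview | src/tqrs/models/rubric.py | _generate_criterion_id
-- ===== SOURCE A (Python) =====
-- def _generate_criterion_id(name: str) -> str:
--     """Generate a criterion ID from the name."""
--     # Convert to lowercase, replace spaces/special chars with underscores
--     cleaned = name.lower().strip()
--     cleaned = cleaned.replace(" / ", "_").replace("/", "_")
--     cleaned = cleaned.replace(" ", "_").replace("(", "").replace(")", "")
--     cleaned = cleaned.replace(",", "").replace(".", "")
--     # Remove consecutive underscores
--     while "__" in cleaned:
--         cleaned = cleaned.replace("__", "_")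
--     return cleaned.strip("_")
-- ===== SOURCE B (Python) =====
-- def _generate_criterion_id(name: str) -> str:
--     """Generate a criterion ID from the name (single-pass rewrite)."""
--     out = []
--     for c in name.lower().strip():
--         if c in "(),.":
--             continue
--         if c in " /_":
--             if not (out and out[-1] == "_"):
--                 out.append("_")
--         else:
--             out.append(c)
--     return "".join(out).strip("_")
-- ===== Notes on version B (the rewrite author's own statement) =====
-- stated objective: alternative
-- what changed: Replaces A's eight sequential str.replace passes plus the repeated '__'->'_' collapse while-loop by a single left-to-right pass over the characters that drops '(),.', emits one '_' for any run of ' ', '/' and '_' via an accumulator, then strips edge underscores.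
import Mathlib
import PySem

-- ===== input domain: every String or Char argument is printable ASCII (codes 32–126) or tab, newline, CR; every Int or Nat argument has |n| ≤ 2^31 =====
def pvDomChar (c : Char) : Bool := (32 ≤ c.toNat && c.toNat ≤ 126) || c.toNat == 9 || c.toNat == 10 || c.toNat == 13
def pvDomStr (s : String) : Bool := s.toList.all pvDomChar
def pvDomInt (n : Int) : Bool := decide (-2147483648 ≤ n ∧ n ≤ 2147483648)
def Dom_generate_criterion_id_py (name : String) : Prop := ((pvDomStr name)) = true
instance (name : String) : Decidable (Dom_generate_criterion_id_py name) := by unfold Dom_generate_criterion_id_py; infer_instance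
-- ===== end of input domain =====

-- B replaces A's chain of replace() passes plus the repeated '__'-collapse while-loop by one
-- left-to-right pass with an accumulator (alternative decomposition, same results).


-- ===== PORT A =====
-- String operations are ported through PySem.Chars on `toList` (exact per PYSEM.md).
-- `pvRepRec` and the lemmas after it exist only to justify TERMINATION of the
-- while-loop `genA_collapse` below (cited by name in its `decreasing_by`).

-- s.replace(old, new) for non-empty old = a :: old', as structural recursion
def pvRepRec (a : Char) (old' new : List Char) : List Char → List Char
  | [] => []
  | c :: t =>
    if (a :: old').isPrefixOf (c :: t) then new ++ pvRepRec a old' new (t.drop old'.length)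
    else c :: pvRepRec a old' new t
  termination_by l => l.length
  decreasing_by
  all_goals simp [List.length_drop]

lemma pvReplace_go_eq (a : Char) (old' new : List Char) :
    ∀ (fuel : Nat) (l acc : List Char), l.length ≤ fuel →
      PySem.Chars.replace.go (a :: old') new fuel l acc = acc.reverse ++ pvRepRec a old' new l := by
  intro fuel
  induction fuel with
  | zero =>
      intro l acc h
      have hl : l = [] := by cases l <;> simp_all
      subst hl
      simp [PySem.Chars.replace.go, pvRepRec]
  | succ n ih =>
      intro l acc h
      cases l with
      | nil => simp [PySem.Chars.replace.go, pvRepRec]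
      | cons c t =>
          rw [PySem.Chars.replace.go, pvRepRec]
          by_cases hp : (a :: old').isPrefixOf (c :: t)
          · simp only [hp, if_true]
            rw [ih]
            · simp
            · simp at h ⊢
              omega
          · simp only [hp, if_false, Bool.false_eq_true]
            rw [ih]
            · simp
            · simp at h; omega

lemma pvReplace_eq (a : Char) (old' new : List Char) (l : List Char) :
    PySem.Chars.replace l (a :: old') new = pvRepRec a old' new l := by
  rw [PySem.Chars.replace]
  simp only [List.isEmpty_cons, if_false, Bool.false_eq_true]
  exact pvReplace_go_eq a old' new l.length l [] le_rfl

lemma pvDD_len_lt : ∀ (l : List Char), (['_', '_'] <:+: l) →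
    (pvRepRec '_' ['_'] ['_'] l).length < l.length := by
  have hle : ∀ (n : Nat) (l : List Char), l.length ≤ n →
      (pvRepRec '_' ['_'] ['_'] l).length ≤ l.length := by
    intro n
    induction n with
    | zero => intro l h
              have : l = [] := by cases l <;> simp_all
              subst this; simp [pvRepRec]
    | succ n ih =>
        intro l h
        cases l with
        | nil => simp [pvRepRec]
        | cons c t =>
            rw [pvRepRec]
            by_cases hp : (['_', '_'] : List Char).isPrefixOf (c :: t)
            · simp only [hp, if_true]
              have := ih (t.drop 1) (by simp only [List.length_drop]; simp at h; omega)
              simp only [List.length_cons, List.length_append, List.length_drop] at this ⊢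
              simp at this ⊢
              omega
            · simp only [hp, if_false, Bool.false_eq_true]
              have := ih t (by simp at h; omega)
              simp
              omega
  have main : ∀ (n : Nat) (l : List Char), l.length ≤ n → (['_', '_'] <:+: l) →
      (pvRepRec '_' ['_'] ['_'] l).length < l.length := by
    intro n
    induction n with
    | zero => intro l h hin
              have : l = [] := by cases l <;> simp_all
              subst this; simp at hin
    | succ n ih =>
        intro l h hin
        cases l with
        | nil => simp at hin
        | cons c t =>
            rw [pvRepRec]
            by_cases hp : (['_', '_'] : List Char).isPrefixOf (c :: t)
            · simp only [hp, if_true]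
              obtain ⟨rest, hrest⟩ := List.isPrefixOf_iff_prefix.mp hp
              have hc : c = '_' := by cases hrest; rfl
              have ht : t = '_' :: rest := by cases hrest; rfl
              subst hc; subst ht
              have := hle rest.length (('_' :: rest).drop 1) (by simp)
              simp at this ⊢
              omega
            · simp only [hp, if_false, Bool.false_eq_true]
              have hin' : (['_', '_'] : List Char) <:+: t := by
                rcases List.infix_cons_iff.mp hin with h1 | h1
                · exact absurd (List.isPrefixOf_iff_prefix.mpr h1) hp
                · exact h1
              have := ih t (by simp at h; omega) hin'
              simp
              omega
  intro l hin
  exact main l.length l le_rfl hin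

lemma pvCollapse_dec (cs : List Char) (h : PySem.Chars.isIn ['_', '_'] cs = true) :
    (PySem.Chars.replace cs ['_', '_'] ['_']).length < cs.length := by
  rw [pvReplace_eq]
  exact pvDD_len_lt cs ((PySem.Chars.isIn_iff_infix _ _).mp h)

-- while "__" in cleaned: cleaned = cleaned.replace("__", "_")
def genA_collapse (cs : List Char) : List Char :=
  if h : PySem.Chars.isIn ['_', '_'] cs = true then
    genA_collapse (PySem.Chars.replace cs ['_', '_'] ['_'])
  else cs
  termination_by cs.length
  decreasing_by exact pvCollapse_dec cs h

def generate_criterion_id_py (name : String) : String :=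
  let c0 := PySem.Chars.strip (PySem.Chars.lower name.toList)
  let c1 := PySem.Chars.replace c0 [' ', '/', ' '] ['_']
  let c2 := PySem.Chars.replace c1 ['/'] ['_']
  let c3 := PySem.Chars.replace c2 [' '] ['_']
  let c4 := PySem.Chars.replace c3 ['('] []
  let c5 := PySem.Chars.replace c4 [')'] []
  let c6 := PySem.Chars.replace c5 [','] []
  let c7 := PySem.Chars.replace c6 ['.'] []
  String.mk (PySem.Chars.stripChars (genA_collapse c7) ['_'])

-- ===== PORT B =====
-- loop body of Source B's single pass (out is the accumulator list)
def genB_step (out : List Char) (c : Char) : List Char :=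
  if ['(', ')', ',', '.'].contains c then out
  else if [' ', '/', '_'].contains c then
    -- `if not (out and out[-1] == '_'): out.append('_')`
    if out.getLast? = some '_' then out else out ++ ['_']
  else out ++ [c]

def generate_criterion_id_py_alt (name : String) : String :=
  let s := PySem.Chars.strip (PySem.Chars.lower name.toList)
  let out := s.foldl genB_step []
  String.mk (PySem.Chars.stripChars out ['_'])

-- ===== PRECONDITION & SPEC =====
def Spec_generate_criterion_id_py (name : String) (out : String) : Prop := out = generate_criterion_id_py_alt name
instance (name : String) (out : String) : Decidable (Spec_generate_criterion_id_py name out) := by unfold Spec_generate_criterion_id_py; infer_instance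

-- ===== CLAIM (what is proved, stated in full; the proofs are below) =====
def Claim_equal_generate_criterion_id_py : Prop := ∀ (name : String), Dom_generate_criterion_id_py name → Spec_generate_criterion_id_py name (generate_criterion_id_py name)

-- ===== LEMMAS AND PROOFS =====

-- the per-character rewrite both programs implement: drop '(),.', map ' ','/','_' to '_'
def pvStep (c : Char) : List Char :=
  if ['(', ')', ',', '.'].contains c then []
  else if [' ', '/', '_'].contains c then ['_']
  else [c]

def pvMF (cs : List Char) : List Char := cs.flatMap pvStep

-- collapse consecutive underscores
def pvSqueeze : List Char → List Char
  | [] => []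
  | [c] => [c]
  | a :: b :: t => if a = '_' ∧ b = '_' then pvSqueeze (b :: t) else a :: pvSqueeze (b :: t)

def pvScons (c : Char) (v : List Char) : List Char :=
  if c = '_' ∧ v.head? = some '_' then v else c :: v

def pvGlue (a v : List Char) : List Char :=
  if a.getLast? = some '_' ∧ v.head? = some '_' then a ++ v.tail else a ++ v

lemma pvSqueeze_head? : ∀ (u : List Char), u ≠ [] → (pvSqueeze u).head? = u.head? := by
  intro u
  induction u using pvSqueeze.induct with
  | case1 => intro h; simp at h
  | case2 c => intro _; simp [pvSqueeze]
  | case3 a b t hab ih =>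
      intro _
      obtain ⟨rfl, rfl⟩ := hab
      have hu : pvSqueeze ('_' :: '_' :: t) = pvSqueeze ('_' :: t) := by
        rw [pvSqueeze]; simp
      rw [hu, ih (by simp)]
      rfl
  | case4 a b t hab ih =>
      intro _
      rw [pvSqueeze, if_neg hab]
      rfl

lemma pvSqueeze_cons (c : Char) (u : List Char) :
    pvSqueeze (c :: u) = pvScons c (pvSqueeze u) := by
  cases u with
  | nil => simp [pvSqueeze, pvScons]
  | cons b t =>
      rw [pvSqueeze, pvScons, pvSqueeze_head? (b :: t) (by simp)]
      simp

lemma pvSqueeze_append (v u : List Char) :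
    pvSqueeze (v ++ u) = v.foldr pvScons (pvSqueeze u) := by
  induction v with
  | nil => simp
  | cons x v' ih => rw [List.cons_append, pvSqueeze_cons, ih]; rfl

lemma pvScons_dd (v : List Char) : pvScons '_' (pvScons '_' v) = pvScons '_' v := by
  by_cases h : v.head? = some '_' <;> simp [pvScons, h]

lemma pvFoldr_usc : ∀ (k : Nat) (v : List Char),
    pvScons '_' (List.foldr pvScons v (List.replicate k '_')) = pvScons '_' v := by
  intro k
  induction k with
  | zero => intro v; simp
  | succ n ih => intro v; simp only [List.replicate_succ, List.foldr_cons, pvScons_dd]; exact ih v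

lemma pvRepRec_single (a : Char) (new : List Char) :
    ∀ l, pvRepRec a [] new l = l.flatMap (fun c => if c = a then new else [c]) := by
  intro l
  induction l with
  | nil => simp [pvRepRec]
  | cons c t ih =>
      rw [pvRepRec]
      by_cases h : c = a
      · subst h; simp [List.isPrefixOf, ih]
      · have hnp : ¬ ([a] : List Char).isPrefixOf (c :: t) = true := by
          simp [List.isPrefixOf]; exact fun hh => h hh.symm
        simp [hnp, ih, h]

lemma pvMF_single (a : Char) (new : List Char) (h : new.flatMap pvStep = pvStep a) (l : List Char) :
    pvMF (pvRepRec a [] new l) = pvMF l := by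
  rw [pvRepRec_single]
  induction l with
  | nil => simp [pvMF]
  | cons c t ih =>
      simp only [List.flatMap_cons, pvMF, List.flatMap_append] at ih ⊢
      by_cases hc : c = a
      · subst hc; simp [h, ih]
      · simp [hc, ih]

lemma pvMF_usc (old' : List Char) (h : ∀ c ∈ old', pvStep c = ['_']) :
    pvMF old' = List.replicate old'.length '_' := by
  induction old' with
  | nil => simp [pvMF]
  | cons c t ih =>
      simp only [pvMF, List.flatMap_cons] at ih ⊢
      rw [h c (by simp), ih (fun c hc => h c (by simp [hc]))]
      simp [List.replicate_succ]

lemma pvStage_sep (a : Char) (old' : List Char) (ha : pvStep a = ['_'])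
    (hold : ∀ c ∈ old', pvStep c = ['_']) :
    ∀ l, pvSqueeze (pvMF (pvRepRec a old' ['_'] l)) = pvSqueeze (pvMF l) := by
  suffices hmain : ∀ (n : Nat) (l : List Char), l.length ≤ n →
      pvSqueeze (pvMF (pvRepRec a old' ['_'] l)) = pvSqueeze (pvMF l) from
    fun l => hmain l.length l le_rfl
  intro n
  induction n with
  | zero => intro l h
            have : l = [] := by cases l <;> simp_all
            subst this; simp [pvRepRec]
  | succ n ih =>
      intro l h
      cases l with
      | nil => simp [pvRepRec]
      | cons c t =>
          rw [pvRepRec]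
          by_cases hp : (a :: old').isPrefixOf (c :: t)
          · simp only [hp, if_true]
            obtain ⟨rest, hrest⟩ := List.isPrefixOf_iff_prefix.mp hp
            have hc : c = a := by cases hrest; rfl
            have ht : t = old' ++ rest := by cases hrest; rfl
            have hdrop : t.drop old'.length = rest := by rw [ht]; simp
            rw [hdrop]
            have hlen : rest.length ≤ n := by
              have hlt := congrArg List.length ht
              simp at hlt h
              omega
            have lhs : pvMF (['_'] ++ pvRepRec a old' ['_'] rest)
                = '_' :: pvMF (pvRepRec a old' ['_'] rest) := by
              simp [pvMF]
              rfl
            rw [lhs, pvSqueeze_cons, ih rest hlen]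
            have rhs : pvMF (c :: t) =
                '_' :: (List.replicate old'.length '_' ++ pvMF rest) := by
              have h1 : pvMF (c :: t) = pvStep c ++ (pvMF old' ++ pvMF rest) := by
                rw [hc, ht]; simp [pvMF]
              rw [h1, hc, ha, pvMF_usc old' hold]
              simp
            rw [rhs, pvSqueeze_cons, pvSqueeze_append, pvFoldr_usc]
          · simp only [hp, if_false, Bool.false_eq_true]
            have hstep : pvMF (c :: pvRepRec a old' ['_'] t)
                = pvStep c ++ pvMF (pvRepRec a old' ['_'] t) := by simp [pvMF]
            have hstep2 : pvMF (c :: t) = pvStep c ++ pvMF t := by simp [pvMF]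
            rw [hstep, hstep2, pvSqueeze_append, pvSqueeze_append,
              ih t (by simp at h; omega)]

lemma pvCollapse_inv (cs : List Char) :
    pvSqueeze (pvMF (genA_collapse cs)) = pvSqueeze (pvMF cs) := by
  induction cs using genA_collapse.induct with
  | case1 cs h ih =>
      rw [genA_collapse, dif_pos h, ih, pvReplace_eq]
      exact pvStage_sep '_' ['_'] (by decide) (by intro c hc; simp at hc; subst hc; decide) cs
  | case2 cs h => rw [genA_collapse, dif_neg h]

lemma pvCollapse_no_dd (cs : List Char) :
    PySem.Chars.isIn ['_', '_'] (genA_collapse cs) = false := by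
  induction cs using genA_collapse.induct with
  | case1 cs h ih => rw [genA_collapse, dif_pos h]; exact ih
  | case2 cs h => rw [genA_collapse, dif_neg h]; simpa using h

lemma pvRepRec_mem (a : Char) (old' new : List Char) :
    ∀ l, ∀ x ∈ pvRepRec a old' new l, x ∈ new ∨ x ∈ l := by
  suffices hmain : ∀ (n : Nat) (l : List Char), l.length ≤ n →
      ∀ x ∈ pvRepRec a old' new l, x ∈ new ∨ x ∈ l from
    fun l => hmain l.length l le_rfl
  intro n
  induction n with
  | zero => intro l h
            have : l = [] := by cases l <;> simp_all
            subst this; simp [pvRepRec]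
  | succ n ih =>
      intro l h
      cases l with
      | nil => simp [pvRepRec]
      | cons c t =>
          rw [pvRepRec]
          by_cases hp : (a :: old').isPrefixOf (c :: t)
          · simp only [hp, if_true]
            intro x hx
            rcases List.mem_append.mp hx with hx | hx
            · exact Or.inl hx
            · rcases ih (t.drop old'.length) (by simp only [List.length_drop]; simp at h; omega) x hx with hx' | hx'
              · exact Or.inl hx'
              · exact Or.inr (by simp [List.mem_of_mem_drop hx'])
          · simp only [hp, if_false, Bool.false_eq_true]
            intro x hx
            rcases List.mem_cons.mp hx with hx | hx
            · exact Or.inr (by simp [hx])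
            · rcases ih t (by simp at h; omega) x hx with hx' | hx'
              · exact Or.inl hx'
              · exact Or.inr (by simp [hx'])

lemma pvCollapse_mem (cs : List Char) : ∀ x ∈ genA_collapse cs, x = '_' ∨ x ∈ cs := by
  induction cs using genA_collapse.induct with
  | case1 cs h ih =>
      rw [genA_collapse, dif_pos h]
      intro x hx
      rcases ih x hx with hx' | hx'
      · exact Or.inl hx'
      · rw [pvReplace_eq] at hx'
        rcases pvRepRec_mem '_' ['_'] ['_'] cs x hx' with hx'' | hx''
        · simp at hx''; exact Or.inl hx''
        · exact Or.inr hx''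
  | case2 cs h => rw [genA_collapse, dif_neg h]; exact fun x hx => Or.inr hx

lemma pvSqueeze_id : ∀ (cs : List Char), ¬ (['_', '_'] <:+: cs) → pvSqueeze cs = cs := by
  intro cs
  induction cs using pvSqueeze.induct with
  | case1 => intro _; rfl
  | case2 c => intro _; rfl
  | case3 a b t hab ih =>
      intro h
      obtain ⟨rfl, rfl⟩ := hab
      exact absurd ⟨[], t, by simp⟩ h
  | case4 a b t hab ih =>
      intro h
      rw [pvSqueeze, if_neg hab, ih (fun hin => h (List.infix_cons hin))]

lemma pvMF_id (cs : List Char) (h : ∀ x ∈ cs, pvStep x = [x]) : pvMF cs = cs := by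
  induction cs with
  | nil => simp [pvMF]
  | cons c t ih =>
      have ih' := ih (fun x hx => h x (by simp [hx]))
      simp only [pvMF, List.flatMap_cons] at ih' ⊢
      rw [h c (by simp), ih']
      rfl

lemma pvNotMem_single (a : Char) (new l : List Char) (h : a ∉ new) :
    a ∉ pvRepRec a [] new l := by
  rw [pvRepRec_single]
  simp only [List.mem_flatMap]
  rintro ⟨c, hc, hmem⟩
  by_cases hca : c = a
  · rw [if_pos hca] at hmem; exact h hmem
  · rw [if_neg hca] at hmem
    simp at hmem
    exact hca hmem.symm

lemma pvNotMem_prop (a x : Char) (new l : List Char) (hnew : x ∉ new) (hl : x ∉ l) :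
    x ∉ pvRepRec a [] new l := by
  intro hx
  rcases pvRepRec_mem a [] new l x hx with h | h
  · exact hnew h
  · exact hl h

lemma pvGlue_step (acc : List Char) (c : Char) (v : List Char) :
    pvGlue (genB_step acc c) v = pvGlue acc ((pvStep c).foldr pvScons v) := by
  by_cases h1 : c = '(' ∨ c = ')' ∨ c = ',' ∨ c = '.'
  · simp [genB_step, pvStep, h1, pvGlue]
  · by_cases h2 : c = ' ' ∨ c = '/' ∨ c = '_'
    · by_cases h3 : acc.getLast? = some '_'
      · by_cases h4 : v.head? = some '_'
        · simp [genB_step, pvStep, pvGlue, pvScons, h1, h2, h3, h4]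
        · simp [genB_step, pvStep, pvGlue, pvScons, h1, h2, h3, h4]
      · by_cases h4 : v.head? = some '_'
        · obtain ⟨v', rfl⟩ : ∃ v', v = '_' :: v' := by
            cases v with
            | nil => simp at h4
            | cons x v' => simp at h4; exact ⟨v', by rw [h4]⟩
          simp [genB_step, pvStep, pvGlue, pvScons, h1, h2, h3, List.getLast?_concat]
        · simp [genB_step, pvStep, pvGlue, pvScons, h1, h2, h3, h4, List.getLast?_concat]
    · have hc : c ≠ '_' := fun hh => h2 (Or.inr (Or.inr hh))
      have h2' : ¬ (c = ' ' ∨ c = '/') := fun hh => h2 (hh.elim Or.inl (fun hx => Or.inr (Or.inl hx)))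
      simp [genB_step, pvStep, pvGlue, pvScons, h1, h2', hc, List.getLast?_concat]

lemma pvFold_glue : ∀ (cs : List Char) (acc : List Char),
    List.foldl genB_step acc cs = pvGlue acc (pvSqueeze (pvMF cs)) := by
  intro cs
  induction cs with
  | nil => intro acc; simp [pvMF, pvSqueeze, pvGlue]
  | cons c t ih =>
      intro acc
      rw [List.foldl_cons, ih, pvGlue_step]
      have hmf : pvMF (c :: t) = pvStep c ++ pvMF t := by simp [pvMF]
      rw [hmf, pvSqueeze_append]

lemma pvStep_id (x : Char) (h1 : x ≠ '(') (h2 : x ≠ ')') (h3 : x ≠ ',') (h4 : x ≠ '.')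
    (h5 : x ≠ ' ') (h6 : x ≠ '/') : pvStep x = [x] := by
  by_cases hu : x = '_'
  · subst hu; decide
  · simp [pvStep, h1, h2, h3, h4, h5, h6, hu]

lemma pvMainList (c0 : List Char) :
    PySem.Chars.stripChars (genA_collapse (PySem.Chars.replace (PySem.Chars.replace
      (PySem.Chars.replace (PySem.Chars.replace (PySem.Chars.replace (PySem.Chars.replace
      (PySem.Chars.replace c0 [' ', '/', ' '] ['_']) ['/'] ['_']) [' '] ['_']) ['('] [])
      [')'] []) [','] []) ['.'] [])) ['_']
    = PySem.Chars.stripChars (List.foldl genB_step [] c0) ['_'] := by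
  rw [pvReplace_eq, pvReplace_eq, pvReplace_eq, pvReplace_eq, pvReplace_eq, pvReplace_eq,
    pvReplace_eq]
  set r1 := pvRepRec ' ' ['/', ' '] ['_'] c0 with hr1
  set r2 := pvRepRec '/' [] ['_'] r1 with hr2
  set r3 := pvRepRec ' ' [] ['_'] r2 with hr3
  set r4 := pvRepRec '(' [] [] r3 with hr4
  set r5 := pvRepRec ')' [] [] r4 with hr5
  set r6 := pvRepRec ',' [] [] r5 with hr6
  set r7 := pvRepRec '.' [] [] r6 with hr7
  have h7 : pvMF r7 = pvMF r6 := pvMF_single '.' [] (by decide) r6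
  have h6 : pvMF r6 = pvMF r5 := pvMF_single ',' [] (by decide) r5
  have h5 : pvMF r5 = pvMF r4 := pvMF_single ')' [] (by decide) r4
  have h4 : pvMF r4 = pvMF r3 := pvMF_single '(' [] (by decide) r3
  have h3 : pvMF r3 = pvMF r2 := pvMF_single ' ' ['_'] (by decide) r2
  have h2 : pvMF r2 = pvMF r1 := pvMF_single '/' ['_'] (by decide) r1
  have h1 : pvSqueeze (pvMF r1) = pvSqueeze (pvMF c0) :=
    pvStage_sep ' ' ['/', ' '] (by decide)
      (by intro c hc; simp at hc; rcases hc with rfl | rfl <;> decide) c0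
  have hchain : pvSqueeze (pvMF r7) = pvSqueeze (pvMF c0) := by
    rw [h7, h6, h5, h4, h3, h2, h1]
  have hcol : pvSqueeze (pvMF (genA_collapse r7)) = pvSqueeze (pvMF c0) := by
    rw [pvCollapse_inv r7, hchain]
  -- none of the six rewritten characters survives to r7
  have n2 : '/' ∉ r2 := pvNotMem_single '/' ['_'] r1 (by decide)
  have n3s : ' ' ∉ r3 := pvNotMem_single ' ' ['_'] r2 (by decide)
  have n3f : '/' ∉ r3 := pvNotMem_prop ' ' '/' ['_'] r2 (by decide) n2
  have n4p : '(' ∉ r4 := pvNotMem_single '(' [] r3 (by decide)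
  have n4s : ' ' ∉ r4 := pvNotMem_prop '(' ' ' [] r3 (by decide) n3s
  have n4f : '/' ∉ r4 := pvNotMem_prop '(' '/' [] r3 (by decide) n3f
  have n5q : ')' ∉ r5 := pvNotMem_single ')' [] r4 (by decide)
  have n5p : '(' ∉ r5 := pvNotMem_prop ')' '(' [] r4 (by decide) n4p
  have n5s : ' ' ∉ r5 := pvNotMem_prop ')' ' ' [] r4 (by decide) n4s
  have n5f : '/' ∉ r5 := pvNotMem_prop ')' '/' [] r4 (by decide) n4f
  have n6c : ',' ∉ r6 := pvNotMem_single ',' [] r5 (by decide)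
  have n6q : ')' ∉ r6 := pvNotMem_prop ',' ')' [] r5 (by decide) n5q
  have n6p : '(' ∉ r6 := pvNotMem_prop ',' '(' [] r5 (by decide) n5p
  have n6s : ' ' ∉ r6 := pvNotMem_prop ',' ' ' [] r5 (by decide) n5s
  have n6f : '/' ∉ r6 := pvNotMem_prop ',' '/' [] r5 (by decide) n5f
  have n7d : '.' ∉ r7 := pvNotMem_single '.' [] r6 (by decide)
  have n7c : ',' ∉ r7 := pvNotMem_prop '.' ',' [] r6 (by decide) n6c
  have n7q : ')' ∉ r7 := pvNotMem_prop '.' ')' [] r6 (by decide) n6q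
  have n7p : '(' ∉ r7 := pvNotMem_prop '.' '(' [] r6 (by decide) n6p
  have n7s : ' ' ∉ r7 := pvNotMem_prop '.' ' ' [] r6 (by decide) n6s
  have n7f : '/' ∉ r7 := pvNotMem_prop '.' '/' [] r6 (by decide) n6f
  have hgood : ∀ x ∈ genA_collapse r7, pvStep x = [x] := by
    intro x hx
    rcases pvCollapse_mem r7 x hx with rfl | hx7
    · decide
    · exact pvStep_id x (fun hh => n7p (hh ▸ hx7)) (fun hh => n7q (hh ▸ hx7))
        (fun hh => n7c (hh ▸ hx7)) (fun hh => n7d (hh ▸ hx7))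
        (fun hh => n7s (hh ▸ hx7)) (fun hh => n7f (hh ▸ hx7))
  have hnodd : ¬ (['_', '_'] <:+: genA_collapse r7) :=
    (PySem.Chars.isIn_eq_false_iff _ _).mp (pvCollapse_no_dd r7)
  have hfix : genA_collapse r7 = pvSqueeze (pvMF c0) := by
    rw [← hcol, pvMF_id (genA_collapse r7) hgood, pvSqueeze_id _ hnodd]
  have hB : List.foldl genB_step [] c0 = pvSqueeze (pvMF c0) := by
    rw [pvFold_glue c0 []]
    simp [pvGlue]
  rw [hfix, hB]

lemma pvMain (name : String) :
    generate_criterion_id_py name = generate_criterion_id_py_alt name := by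
  simp only [generate_criterion_id_py, generate_criterion_id_py_alt]
  rw [pvMainList]

-- ===== VERDICT (by name: the statement is the Claim_ definition above) =====
theorem generate_criterion_id_py_spec : Claim_equal_generate_criterion_id_py := by
  intro name _
  unfold Spec_generate_criterion_id_py
  exact pvMain name
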